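-- pv_equiv track=rewrite | github.com/AIForHindustan/aion_algo_trading | src/shared_core/instrument_token/instrument_registry.py | _strip_broker_suffixes
-- ===== SOURCE A (Python) =====
-- from typing import Dict, List, Optional, Any, Tuple, Set
--
-- def _strip_broker_suffixes(
--     symbol: str, exchange: Optional[str] = None
-- ) -> str:
--     """
--     Strip broker-specific suffixes from symbol.
--     Handles formats from various brokers.
--     """
--     # Common broker suffix patterns
--     suffix_patterns = [
--         '-EQ',    # Angel One NSE equity
--         '-BE',    # Angel One BSE equity
--         '-NFO',   # F&O suffixes
--         '-FUT',   # Futures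
--         '-CE', '-PE',  # Options
--         '-ETF',   # ETFs
--     ]
--
--     # Exchange-specific handling
--     if exchange == 'NSE':
--         # Remove common NSE suffixes
--         for suffix in ['-EQ', '-NSE']:
--             if symbol.endswith(suffix):
--                 return symbol[:-len(suffix)]
--     elif exchange == 'BSE':
--         # Remove common BSE suffixes
--         for suffix in ['-BE', '-BSE']:
--             if symbol.endswith(suffix):
--                 return symbol[:-len(suffix)]
--
--     # Generic suffix removal
--     for suffix in suffix_patterns:
--         if symbol.endswith(suffix):
--             return symbol[:-len(suffix)]
--
--     return symbol
-- ===== SOURCE B (Python) =====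
-- def _strip_broker_suffixes(symbol, exchange=None):
--     """Strip broker-specific suffixes from symbol.
--
--     Instead of chained endswith loops, split once at the LAST '-' and check
--     the tail against the applicable tail set: since every recognised suffix
--     is '-' followed by a dash-free tail, at most one suffix can ever match,
--     and it is exactly the part after the last '-'.
--     """
--     tails = ('EQ', 'BE', 'NFO', 'FUT', 'CE', 'PE', 'ETF')
--     if exchange == 'NSE':
--         tails += ('NSE',)
--     elif exchange == 'BSE':
--         tails += ('BSE',)
--     base, sep, tail = symbol.rpartition('-')
--     return base if sep and tail in tails else symbol
-- ===== Notes on version B (the rewrite author's own statement) =====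
-- stated objective: simpler
-- what changed: Replaces the three sequential endswith-and-slice loops by a single rpartition at the last '-' plus one membership test of the tail against the applicable tail set (with 'NSE'/'BSE' added per exchange); correctness rests on every suffix being '-' plus a dash-free tail, so only the part after the last '-' can ever match.
import Mathlib
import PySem

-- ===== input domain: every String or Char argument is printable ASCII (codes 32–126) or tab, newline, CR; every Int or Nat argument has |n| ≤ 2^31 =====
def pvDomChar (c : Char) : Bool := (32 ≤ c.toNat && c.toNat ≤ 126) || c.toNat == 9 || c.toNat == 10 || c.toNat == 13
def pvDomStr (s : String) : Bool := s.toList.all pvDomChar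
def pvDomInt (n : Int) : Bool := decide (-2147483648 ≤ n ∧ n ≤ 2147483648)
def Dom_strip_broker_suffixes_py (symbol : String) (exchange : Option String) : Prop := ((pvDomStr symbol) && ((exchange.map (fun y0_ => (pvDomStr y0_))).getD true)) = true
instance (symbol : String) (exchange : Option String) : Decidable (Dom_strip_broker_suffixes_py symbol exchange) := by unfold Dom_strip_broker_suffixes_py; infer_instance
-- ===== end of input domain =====

set_option maxHeartbeats 1600000


-- B replaces A's chained endswith loops by one split at the last '-' plus a tail-set membership test (objective: simpler).

-- ===== PORT A =====
-- 'for suffix in sufs: if symbol.endswith(suffix): return symbol[:-len(suffix)]' — first match wins, none → fall through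
def pyStripLoop (sufs : List String) (symbol : String) : Option String :=
  match sufs with
  | [] => none
  | suf :: rest =>
    if PySem.Str.endswith symbol suf then
      some (PySem.Str.slice symbol none (some (-(suf.length : Int))))
    else pyStripLoop rest symbol

def strip_broker_suffixes_py (symbol : String) (exchange : Option String) : String :=
  let exchRes : Option String :=
    if exchange = some "NSE" then pyStripLoop ["-EQ", "-NSE"] symbol
    else if exchange = some "BSE" then pyStripLoop ["-BE", "-BSE"] symbol
    else none
  match exchRes with
  | some r => r
  | none =>
    match pyStripLoop ["-EQ", "-BE", "-NFO", "-FUT", "-CE", "-PE", "-ETF"] symbol with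
    | some r => r
    | none => symbol

-- ===== PORT B =====
-- symbol.rpartition('-'), ported by hand: scan the REVERSED char list for the first '-';
-- some (tailRev, baseRev) means symbol = base ++ "-" ++ tail; none means no '-' (Python's ('', '', symbol)).
def rpartitionDash (l : List Char) : Option (List Char × List Char) :=
  match l with
  | [] => none
  | c :: cs =>
    if c = '-' then some ([], cs)
    else match rpartitionDash cs with
      | none => none
      | some (t, b) => some (c :: t, b)

def altTails (exchange : Option String) : List String :=
  ["EQ", "BE", "NFO", "FUT", "CE", "PE", "ETF"] ++
    (if exchange = some "NSE" then ["NSE"]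
     else if exchange = some "BSE" then ["BSE"]
     else [])

def strip_broker_suffixes_py_alt (symbol : String) (exchange : Option String) : String :=
  match rpartitionDash symbol.toList.reverse with
  | some (tRev, bRev) =>
    if (altTails exchange).contains (String.ofList tRev.reverse) then String.ofList bRev.reverse
    else symbol
  | none => symbol

-- ===== PRECONDITION & SPEC =====
def Spec_strip_broker_suffixes_py (symbol : String) (exchange : Option String) (out : String) : Prop := out = strip_broker_suffixes_py_alt symbol exchange
instance (symbol : String) (exchange : Option String) (out : String) : Decidable (Spec_strip_broker_suffixes_py symbol exchange out) := by unfold Spec_strip_broker_suffixes_py; infer_instance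

-- ===== CLAIM (what is proved, stated in full; the proofs are below) =====
def Claim_equal_strip_broker_suffixes_py : Prop := ∀ (symbol : String) (exchange : Option String), Dom_strip_broker_suffixes_py symbol exchange → Spec_strip_broker_suffixes_py symbol exchange (strip_broker_suffixes_py symbol exchange)

-- ===== LEMMAS AND PROOFS =====

theorem rpartitionDash_none {l : List Char} (h : rpartitionDash l = none) : '-' ∉ l := by
  induction l with
  | nil => simp
  | cons c cs ih =>
    unfold rpartitionDash at h
    by_cases hc : c = '-'
    · simp [hc] at h
    · simp only [hc, if_false] at h
      cases hr : rpartitionDash cs with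
      | none => simp [Ne.symm hc, ih hr]
      | some p => rw [hr] at h; simp at h

theorem rpartitionDash_some {l t b : List Char} (h : rpartitionDash l = some (t, b)) :
    l = t ++ '-' :: b ∧ '-' ∉ t := by
  induction l generalizing t b with
  | nil => simp [rpartitionDash] at h
  | cons c cs ih =>
    unfold rpartitionDash at h
    by_cases hc : c = '-'
    · simp only [hc, if_true, Option.some.injEq, Prod.mk.injEq] at h
      obtain ⟨h1, h2⟩ := h
      simp [← h1, ← h2, hc]
    · simp only [hc, if_false] at h
      cases hr : rpartitionDash cs with
      | none => rw [hr] at h; simp at h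
      | some p =>
        obtain ⟨t', b'⟩ := p
        rw [hr] at h
        simp only [Option.some.injEq, Prod.mk.injEq] at h
        obtain ⟨h1, h2⟩ := h
        obtain ⟨hcs, hnot⟩ := ih hr
        subst h2
        constructor
        · rw [← h1, hcs]; rfl
        · rw [← h1]; simp [hnot, Ne.symm hc]

-- A suffix "-t" (t dash-free) matches symbol = base ++ "-" ++ tail iff t is exactly the tail.
theorem endswith_char {symbol : String} {bRev tRev t : List Char}
    (hs : symbol.toList = bRev.reverse ++ '-' :: tRev.reverse)
    (htr : '-' ∉ tRev) (ht : '-' ∉ t) :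
    PySem.Chars.endswith symbol.toList ('-' :: t) = decide (tRev.reverse = t) := by
  rw [Bool.eq_iff_iff, decide_eq_true_iff]
  rw [PySem.Chars.endswith_iff, hs]
  constructor
  · intro hsuf2
    have hsuf3 : ('-' :: tRev.reverse) <:+ (bRev.reverse ++ '-' :: tRev.reverse) :=
      ⟨bRev.reverse, rfl⟩
    rcases List.suffix_or_suffix_of_suffix hsuf2 hsuf3 with h | h
    · rcases h with ⟨pre, hpre⟩
      cases pre with
      | nil =>
        simp only [List.nil_append, List.cons.injEq] at hpre
        exact hpre.2.symm
      | cons x xs =>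
        exfalso
        have hmem : '-' ∈ tRev.reverse := by
          have : (xs ++ '-' :: t) = tRev.reverse := by
            have := hpre
            simp only [List.cons_append, List.cons.injEq] at this
            exact this.2
          rw [← this]; simp
        exact htr (List.mem_reverse.mp hmem)
    · rcases h with ⟨pre, hpre⟩
      cases pre with
      | nil =>
        simp only [List.nil_append, List.cons.injEq] at hpre
        exact hpre.2
      | cons x xs =>
        exfalso
        apply ht
        have : (xs ++ '-' :: tRev.reverse) = t := by
          have := hpre
          simp only [List.cons_append, List.cons.injEq] at this
          exact this.2
        rw [← this]; simp
  · intro heq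
    rw [← heq]
    exact ⟨bRev.reverse, rfl⟩

theorem endswith_false_of_none {symbol : String} {t : List Char}
    (hnd : '-' ∉ symbol.toList) :
    PySem.Chars.endswith symbol.toList ('-' :: t) = false := by
  rw [← Bool.not_eq_true]
  intro h
  rw [PySem.Chars.endswith_iff] at h
  exact hnd (h.subset (by simp))

-- symbol[:-len(suffix)] is the base when the suffix matched.
theorem slice_val {symbol : String} {bRev tRev t : List Char} (k : ℤ)
    (hs : symbol.toList = bRev.reverse ++ '-' :: tRev.reverse)
    (heq : tRev.reverse = t) (hk : k = 1 + t.length) :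
    PySem.Str.slice symbol none (some (-k)) = String.ofList bRev.reverse := by
  have hlen : tRev.length = t.length := by rw [← heq]; simp
  have hk2 : k = ((1 + tRev.length : ℕ) : ℤ) := by push_cast; omega
  have h1 : (PySem.Str.slice symbol none (some (-k))).toList = bRev.reverse := by
    rw [PySem.Str.toList_slice, PySem.Chars.slice_eq_listSlice, hk2]
    rw [PySem.List.slice_to_neg_natCast _ _ (by omega), hs]
    have hL : (bRev.reverse ++ '-' :: tRev.reverse).length - (1 + tRev.length) = bRev.reverse.length := by
      simp only [List.length_append, List.length_reverse, List.length_cons]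
      omega
    rw [hL, List.take_left]
  have := congrArg String.ofList h1
  simpa using this

theorem strip_broker_suffixes_py_eq (symbol : String) (exchange : Option String) :
    strip_broker_suffixes_py symbol exchange = strip_broker_suffixes_py_alt symbol exchange := by
  cases hr : rpartitionDash symbol.toList.reverse with
  | none =>
    -- no '-' in symbol: every endswith is false, both sides return symbol
    have hnd : '-' ∉ symbol.toList := fun h => rpartitionDash_none hr (List.mem_reverse.mpr h)
    have heEQ := endswith_false_of_none (symbol := symbol) (t := ['E','Q']) hnd
    have heNSE := endswith_false_of_none (symbol := symbol) (t := ['N','S','E']) hnd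
    have heBE := endswith_false_of_none (symbol := symbol) (t := ['B','E']) hnd
    have heBSE := endswith_false_of_none (symbol := symbol) (t := ['B','S','E']) hnd
    have heNFO := endswith_false_of_none (symbol := symbol) (t := ['N','F','O']) hnd
    have heFUT := endswith_false_of_none (symbol := symbol) (t := ['F','U','T']) hnd
    have heCE := endswith_false_of_none (symbol := symbol) (t := ['C','E']) hnd
    have hePE := endswith_false_of_none (symbol := symbol) (t := ['P','E']) hnd
    have heETF := endswith_false_of_none (symbol := symbol) (t := ['E','T','F']) hnd
    simp only [strip_broker_suffixes_py, strip_broker_suffixes_py_alt]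
    rw [hr]
    split_ifs <;>
      simp [pyStripLoop, heEQ, heNSE, heBE, heBSE, heNFO, heFUT, heCE, hePE, heETF]
  | some p =>
    obtain ⟨tRev, bRev⟩ := p
    obtain ⟨hl, htr⟩ := rpartitionDash_some hr
    have hs : symbol.toList = bRev.reverse ++ '-' :: tRev.reverse := by
      have := congrArg List.reverse hl
      simpa using this
    have heEQ := endswith_char (symbol := symbol) (t := ['E','Q']) hs htr (by simp)
    have heNSE := endswith_char (symbol := symbol) (t := ['N','S','E']) hs htr (by simp)
    have heBE := endswith_char (symbol := symbol) (t := ['B','E']) hs htr (by simp)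
    have heBSE := endswith_char (symbol := symbol) (t := ['B','S','E']) hs htr (by simp)
    have heNFO := endswith_char (symbol := symbol) (t := ['N','F','O']) hs htr (by simp)
    have heFUT := endswith_char (symbol := symbol) (t := ['F','U','T']) hs htr (by simp)
    have heCE := endswith_char (symbol := symbol) (t := ['C','E']) hs htr (by simp)
    have hePE := endswith_char (symbol := symbol) (t := ['P','E']) hs htr (by simp)
    have heETF := endswith_char (symbol := symbol) (t := ['E','T','F']) hs htr (by simp)
    simp only [strip_broker_suffixes_py, strip_broker_suffixes_py_alt, altTails]
    rw [hr]
    simp only [pyStripLoop, PySem.Str.endswith_eq,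
      show ("-EQ" : String).toList = ['-','E','Q'] from rfl,
      show ("-NSE" : String).toList = ['-','N','S','E'] from rfl,
      show ("-BE" : String).toList = ['-','B','E'] from rfl,
      show ("-BSE" : String).toList = ['-','B','S','E'] from rfl,
      show ("-NFO" : String).toList = ['-','N','F','O'] from rfl,
      show ("-FUT" : String).toList = ['-','F','U','T'] from rfl,
      show ("-CE" : String).toList = ['-','C','E'] from rfl,
      show ("-PE" : String).toList = ['-','P','E'] from rfl,
      show ("-ETF" : String).toList = ['-','E','T','F'] from rfl,
      heEQ, heNSE, heBE, heBSE, heNFO, heFUT, heCE, hePE, heETF]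
    by_cases h1 : tRev.reverse = ['E','Q']
    · rw [h1]
      simp [List.contains_eq_mem]
      split_ifs <;> first | rfl | exact slice_val 3 hs h1 (by norm_num)
    by_cases h2 : tRev.reverse = ['N','S','E']
    · rw [h2]
      simp [List.contains_eq_mem]
      split_ifs <;> first | rfl | exact slice_val 4 hs h2 (by norm_num) | simp_all
    by_cases h3 : tRev.reverse = ['B','E']
    · rw [h3]
      simp [List.contains_eq_mem]
      split_ifs <;> first | rfl | exact slice_val 3 hs h3 (by norm_num)
    by_cases h4 : tRev.reverse = ['B','S','E']
    · rw [h4]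
      simp [List.contains_eq_mem]
      split_ifs <;> first | rfl | exact slice_val 4 hs h4 (by norm_num) | simp_all
    by_cases h5 : tRev.reverse = ['N','F','O']
    · rw [h5]
      simp [List.contains_eq_mem]
      exact slice_val 4 hs h5 (by norm_num)
    by_cases h6 : tRev.reverse = ['F','U','T']
    · rw [h6]
      simp [List.contains_eq_mem]
      exact slice_val 4 hs h6 (by norm_num)
    by_cases h7 : tRev.reverse = ['C','E']
    · rw [h7]
      simp [List.contains_eq_mem]
      exact slice_val 3 hs h7 (by norm_num)
    by_cases h8 : tRev.reverse = ['P','E']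
    · rw [h8]
      simp [List.contains_eq_mem]
      exact slice_val 3 hs h8 (by norm_num)
    by_cases h9 : tRev.reverse = ['E','T','F']
    · rw [h9]
      simp [List.contains_eq_mem]
      exact slice_val 4 hs h9 (by norm_num)
    · simp [h1, h2, h3, h4, h5, h6, h7, h8, h9, List.contains_eq_mem]
      have hne : ∀ u : List Char, tRev.reverse ≠ u → ¬ String.ofList tRev.reverse = String.ofList u := by
        intro u hu h
        exact hu (by simpa using congrArg String.toList h)
      simp only [show ("EQ" : String) = String.ofList ['E','Q'] from rfl,
        show ("NSE" : String) = String.ofList ['N','S','E'] from rfl,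
        show ("BE" : String) = String.ofList ['B','E'] from rfl,
        show ("BSE" : String) = String.ofList ['B','S','E'] from rfl,
        show ("NFO" : String) = String.ofList ['N','F','O'] from rfl,
        show ("FUT" : String) = String.ofList ['F','U','T'] from rfl,
        show ("CE" : String) = String.ofList ['C','E'] from rfl,
        show ("PE" : String) = String.ofList ['P','E'] from rfl,
        show ("ETF" : String) = String.ofList ['E','T','F'] from rfl]
      simp [hne _ h1, hne _ h3, hne _ h5, hne _ h6, hne _ h7, hne _ h8, hne _ h9]
      split_ifs with hN hB
      · intro hmem
        rw [List.mem_singleton] at hmem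
        exact absurd (by simpa using congrArg String.toList hmem) h2
      · intro hmem
        rw [List.mem_singleton] at hmem
        exact absurd (by simpa using congrArg String.toList hmem) h4
      · intro hmem
        exact absurd hmem List.not_mem_nil

-- ===== VERDICT (by name: the statement is the Claim_ definition above) =====
theorem strip_broker_suffixes_py_spec : Claim_equal_strip_broker_suffixes_py := by
  intro symbol exchange _
  unfold Spec_strip_broker_suffixes_py
  exact strip_broker_suffixes_py_eq symbol exchange
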